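-- pv_equiv track=rewrite | github.com/Rali0s/Deep-Nim-Sec | Data-Sets/Data-Parser/Archive/unified_parser.py | ensure_min_rows
-- ===== SOURCE A (Python) =====
-- from typing import Iterable, List, Optional, Tuple
--
-- def ensure_min_rows(records: List[Tuple[str, str]], min_rows: int) -> List[Tuple[str, str]]:
--     if len(records) >= min_rows:
--         return records
--     if not records:
--         return records
--     out = list(records)
--     idx = 0
--     while len(out) < min_rows:
--         out.append(records[idx % len(records)])
--         idx += 1
--     return out
-- ===== SOURCE B (Python) =====
-- def ensure_min_rows(records, min_rows):
--     if len(records) >= min_rows: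
--         return records
--     if not records:
--         return records
--     q, r = divmod(min_rows, len(records))
--     return records * q + records[:r]
-- ===== Notes on version B (the rewrite author's own statement) =====
-- stated objective: simpler
-- what changed: Replaces the element-by-element while loop with modulo indexing by a closed-form construction: divmod gives the number of full repetitions and the remainder, and the result is built at once as records * q + records[:r].
import Mathlib
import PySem

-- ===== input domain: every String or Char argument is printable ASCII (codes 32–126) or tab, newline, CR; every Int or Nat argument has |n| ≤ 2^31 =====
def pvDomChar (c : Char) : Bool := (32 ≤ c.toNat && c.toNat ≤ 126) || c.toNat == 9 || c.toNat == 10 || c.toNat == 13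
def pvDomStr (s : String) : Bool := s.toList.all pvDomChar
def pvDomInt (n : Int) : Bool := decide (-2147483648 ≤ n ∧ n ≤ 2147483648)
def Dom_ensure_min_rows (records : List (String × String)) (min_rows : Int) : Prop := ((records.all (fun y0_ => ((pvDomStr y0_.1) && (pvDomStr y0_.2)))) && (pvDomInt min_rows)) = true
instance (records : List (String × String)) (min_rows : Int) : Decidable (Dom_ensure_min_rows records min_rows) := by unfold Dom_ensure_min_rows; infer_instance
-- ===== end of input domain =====

-- B replaces A's append-one-at-a-time while loop (modulo indexing) by the closed form
-- records * q ++ records[:r] with (q, r) = divmod(min_rows, len(records)); same return value.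

-- ===== PORT A =====
-- the 'while len(out) < min_rows' loop; records[idx % len(records)] is always in range here
-- fuel = min_rows - len(out) iterations remain; the guard is re-checked each step as in Python
def emrLoop (records : List (String × String)) (min_rows : Int) (out : List (String × String)) (idx : Int) : Nat → List (String × String)
  | 0 => out
  | fuel + 1 =>
    if (out.length : Int) < min_rows then
      emrLoop records min_rows
        (out ++ [PySem.List.pyGetD records (PySem.Int.mod idx (records.length : Int)) ("", "")])
        (idx + 1) fuel
    else out

def ensure_min_rows (records : List (String × String)) (min_rows : Int) : List (String × String) :=
  if min_rows ≤ (records.length : Int) then records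
  else if records = [] then records
  else emrLoop records min_rows records 0 (min_rows - (records.length : Int)).toNat

-- ===== PORT B =====
def ensure_min_rows_alt (records : List (String × String)) (min_rows : Int) : List (String × String) :=
  if min_rows ≤ (records.length : Int) then records
  else if records = [] then records
  else
    let q := PySem.Int.floordiv min_rows (records.length : Int)
    let r := PySem.Int.mod min_rows (records.length : Int)
    (List.replicate q.toNat records).flatten ++ PySem.List.slice records none (some r)

-- ===== PRECONDITION & SPEC =====
def Spec_ensure_min_rows (records : List (String × String)) (min_rows : Int) (out : List (String × String)) : Prop := out = ensure_min_rows_alt records min_rows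
instance (records : List (String × String)) (min_rows : Int) (out : List (String × String)) : Decidable (Spec_ensure_min_rows records min_rows out) := by unfold Spec_ensure_min_rows; infer_instance

-- ===== CLAIM (what is proved, stated in full; the proofs are below) =====
def Claim_equal_ensure_min_rows : Prop := ∀ (records : List (String × String)) (min_rows : Int), Dom_ensure_min_rows records min_rows → Spec_ensure_min_rows records min_rows (ensure_min_rows records min_rows)

-- ===== LEMMAS AND PROOFS =====

-- cyclic element j of records
def emrCyc (records : List (String × String)) (j : Nat) : String × String :=
  records.getD (j % records.length) ("", "")

theorem emrLoop_eq (records : List (String × String)) (min_rows : Int) :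
    ∀ (n : Nat) (out : List (String × String)) (k : Nat),
      (min_rows - (out.length : Int)).toNat = n →
      emrLoop records min_rows out (k : Int) n
        = out ++ (List.range n).map (fun j => emrCyc records (k + j)) := by
  intro n
  induction n with
  | zero =>
    intro out k h
    simp [emrLoop]
  | succ n ih =>
    intro out k h
    rw [emrLoop]
    rw [if_pos (by omega)]
    have hmod : PySem.Int.mod (k : Int) (records.length : Int)
        = ((k % records.length : Nat) : Int) := PySem.Int.mod_natCast k records.length
    have hget : PySem.List.pyGetD records (PySem.Int.mod (k : Int) (records.length : Int)) ("", "")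
        = emrCyc records k := by
      rw [hmod, PySem.List.pyGetD_natCast]; rfl
    rw [hget]
    have hk1 : (k : Int) + 1 = ((k + 1 : Nat) : Int) := by push_cast; ring
    rw [hk1, ih (out ++ [emrCyc records k]) (k + 1) (by simp; omega)]
    rw [List.range_succ_eq_map]
    simp only [List.map_cons, List.map_map, List.append_assoc, List.singleton_append]
    congr 2
    apply List.map_congr_left
    intro j _
    simp only [Function.comp]
    congr 1
    omega

-- records.take R, for R ≤ len, is the first R cyclic elements
theorem emrTake_eq (records : List (String × String)) (R : Nat) (hR : R ≤ records.length) :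
    records.take R = (List.range R).map (fun j => emrCyc records j) := by
  apply List.ext_getElem
  · simp [hR]
  · intro i h1 h2
    simp only [List.getElem_take, List.getElem_map, List.getElem_range]
    have hi : i < R := by simpa [hR] using h1
    have hiL : i < records.length := lt_of_lt_of_le hi hR
    simp [emrCyc, Nat.mod_eq_of_lt hiL, List.getD_eq_getElem?_getD, List.getElem?_eq_getElem hiL]

theorem emrRep_eq (records : List (String × String)) :
    ∀ (Q R : Nat), R ≤ records.length →
      (List.replicate Q records).flatten ++ records.take R
        = (List.range (Q * records.length + R)).map (fun j => emrCyc records j) := by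
  intro Q
  induction Q with
  | zero =>
    intro R hR
    simpa using emrTake_eq records R hR
  | succ Q ih =>
    intro R hR
    have harith : (Q + 1) * records.length + R = records.length + (Q * records.length + R) := by ring
    rw [harith, List.range_add, List.map_append]
    have h1 : (List.range records.length).map (fun j => emrCyc records j) = records := by
      have := emrTake_eq records records.length (le_refl _)
      simpa using this.symm
    have h2 : (List.range (Q * records.length + R)).map
        (fun j => emrCyc records (records.length + j))
        = (List.range (Q * records.length + R)).map (fun j => emrCyc records j) := by
      apply List.map_congr_left
      intro j _
      simp [emrCyc, Nat.add_mod_left]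
    rw [List.map_map]
    simp only [Function.comp_def]
    rw [h2, h1, List.replicate_succ, List.flatten_cons, List.append_assoc, ih R hR]

-- ===== VERDICT (by name: the statement is the Claim_ definition above) =====
theorem ensure_min_rows_spec : Claim_equal_ensure_min_rows := by
  intro records min_rows _
  unfold Spec_ensure_min_rows ensure_min_rows ensure_min_rows_alt
  by_cases h1 : min_rows ≤ (records.length : Int)
  · simp [h1]
  · rw [if_neg h1, if_neg h1]
    by_cases h2 : records = []
    · simp [h2]
    · rw [if_neg h2, if_neg h2]
      have hLpos : 0 < records.length := List.length_pos_iff.mpr h2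
      have hLi : (0 : Int) < (records.length : Int) := by exact_mod_cast hLpos
      set q := PySem.Int.floordiv min_rows (records.length : Int) with hq
      set r := PySem.Int.mod min_rows (records.length : Int) with hr
      have hqr : q * (records.length : Int) + r = min_rows :=
        PySem.Int.floordiv_mul_add_mod min_rows (records.length : Int)
      have hr0 : 0 ≤ r := PySem.Int.mod_nonneg min_rows hLi
      have hrL : r < (records.length : Int) := PySem.Int.mod_lt min_rows hLi
      have hq0 : 0 ≤ q := by
        rw [hq, PySem.Int.floordiv_eq_ediv_of_pos hLi]
        exact Int.ediv_nonneg (by omega) (by omega)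
      show emrLoop records min_rows records 0 (min_rows - (records.length : Int)).toNat
        = (List.replicate q.toNat records).flatten ++ PySem.List.slice records none (some r)
      -- A side
      have hA := emrLoop_eq records min_rows (min_rows - (records.length : Int)).toNat
        records 0 rfl
      simp only [Nat.cast_zero] at hA
      rw [hA]
      -- B side: the slice is a take
      have hrcast : r = ((r.toNat : Nat) : Int) := by omega
      have hslice : PySem.List.slice records none (some r) = records.take r.toNat := by
        rw [hrcast]; exact PySem.List.slice_to_natCast records r.toNat
      rw [hslice, emrRep_eq records q.toNat r.toNat (by omega)]
      -- index arithmetic: q.toNat * len + r.toNat = min_rows.toNat = len + (min_rows - len).toNat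
      have hsum : q.toNat * records.length + r.toNat
          = records.length + (min_rows - (records.length : Int)).toNat := by
        have hcast : ((q.toNat * records.length + r.toNat : Nat) : Int)
            = ((records.length + (min_rows - (records.length : Int)).toNat : Nat) : Int) := by
          push_cast [Int.toNat_of_nonneg hq0, Int.toNat_of_nonneg hr0,
            Int.toNat_of_nonneg (by omega : (0:Int) ≤ min_rows - (records.length : Int))]
          omega
        exact_mod_cast hcast
      rw [hsum, List.range_add, List.map_append]
      have h1' : (List.range records.length).map (fun j => emrCyc records j) = records := by
        have := emrTake_eq records records.length (le_refl _)
        simpa using this.symm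
      rw [List.map_map]
      simp only [Function.comp_def]
      rw [h1']
      congr 1
      apply List.map_congr_left
      intro j _
      simp [emrCyc, Nat.add_mod_left]
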